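-- pv_equiv track=rewrite | github.com/RonnySanMartin/setp03 | cuenta_palabras.py | cuenta_palabras
-- ===== SOURCE A (Python) =====
-- def cuenta_palabras(diccionario):
-- 	if len(diccionario) == 0:						#Caso base: diccionario vacio = 0
-- 		return 0
-- 	else:
-- 		datos = list(diccionario.items())[0]		#Tupla con "primer" item del diccionario
-- 		aux = diccionario.copy()					#Copia del diccionario (evita alteraciones al original)
-- 		aux.pop(datos[0])							#Elimina elemento ya guardado en variable datos
-- 		return datos[1] + cuenta_palabras(aux)		#Cantidad de datos mas lo obtenido de aux
-- ===== SOURCE B (Python) =====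
-- def cuenta_palabras(diccionario):
--     # Iterative re-implementation: fold the dict's values right-to-left
--     # with an explicit accumulator instead of recursion + copy/pop.
--     total = 0
--     for valor in reversed(list(diccionario.values())):
--         total = valor + total
--     return total
-- ===== Notes on version B (the rewrite author's own statement) =====
-- stated objective: faster
-- what changed: Replaces the recursion that copies the dict and pops the first key at every step with a single iterative loop over the values in reverse order accumulating the sum.
import Mathlib
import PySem

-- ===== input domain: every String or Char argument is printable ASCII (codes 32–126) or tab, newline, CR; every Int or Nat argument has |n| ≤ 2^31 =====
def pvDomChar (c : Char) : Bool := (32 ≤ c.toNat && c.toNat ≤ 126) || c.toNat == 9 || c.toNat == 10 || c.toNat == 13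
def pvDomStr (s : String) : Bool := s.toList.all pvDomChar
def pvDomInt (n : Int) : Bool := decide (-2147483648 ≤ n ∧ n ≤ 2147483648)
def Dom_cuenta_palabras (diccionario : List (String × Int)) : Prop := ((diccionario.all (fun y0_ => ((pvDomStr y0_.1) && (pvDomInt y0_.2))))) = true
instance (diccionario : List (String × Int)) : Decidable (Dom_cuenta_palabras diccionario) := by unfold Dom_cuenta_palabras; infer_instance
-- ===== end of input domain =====

-- B replaces A's recursion (which copies the dict and pops a key per step, O(n^2))
-- with one iterative reverse-order accumulator loop over the values (O(n)).


-- ===== PORT A =====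
-- literal port of A: empty dict → 0; otherwise take the first item, copy the
-- dict, pop that key from the copy, and recurse on the remainder.
def cuenta_palabras : List (String × Int) → Int
  | [] => 0
  | (k, v) :: rest =>
      v + cuenta_palabras ((PySem.Dict.erase (PySem.Dict.mk ((k, v) :: rest)) k).items)
  termination_by l => l.length
  decreasing_by
    simp only [PySem.Dict.erase, List.filter_cons, beq_self_eq_true, Bool.not_true,
      if_neg (Bool.false_ne_true), List.length_cons]
    exact Nat.lt_succ_of_le (List.length_filter_le _ _)

-- ===== PORT B =====
-- port of B: fold the values in reverse insertion order with an accumulator.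
def cuenta_palabras_alt (diccionario : List (String × Int)) : Int :=
  ((diccionario.map (·.2)).reverse).foldl (fun total valor => valor + total) 0

-- ===== PRECONDITION & SPEC =====
-- Pre_ states the Python dict representation invariant: distinct keys (a Python
-- dict argument can never present duplicate keys, so this excludes nothing A runs on).
def Pre_cuenta_palabras (diccionario : List (String × Int)) : Prop :=
  (diccionario.map Prod.fst).Nodup
instance (diccionario : List (String × Int)) : Decidable (Pre_cuenta_palabras diccionario) := by
  unfold Pre_cuenta_palabras; infer_instance

def pvWitness_cuenta_palabras : (List (String × Int)) := [("hola", 3), ("mundo", 2)]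

def Spec_cuenta_palabras (diccionario : List (String × Int)) (out : Int) : Prop := out = cuenta_palabras_alt diccionario
instance (diccionario : List (String × Int)) (out : Int) : Decidable (Spec_cuenta_palabras diccionario out) := by unfold Spec_cuenta_palabras; infer_instance

-- ===== CLAIM (what is proved, stated in full; the proofs are below) =====
def Claim_equal_cuenta_palabras : Prop := ∀ (diccionario : List (String × Int)), Dom_cuenta_palabras diccionario → Pre_cuenta_palabras diccionario → Spec_cuenta_palabras diccionario (cuenta_palabras diccionario)

-- ===== LEMMAS AND PROOFS =====

-- B's accumulator loop peels one value off the front per cons cell.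
lemma alt_cons (k : String) (v : Int) (rest : List (String × Int)) :
    cuenta_palabras_alt ((k, v) :: rest) = v + cuenta_palabras_alt rest := by
  simp [cuenta_palabras_alt, List.foldl_reverse]

-- With distinct keys, popping the first key from the copy leaves exactly the tail.
lemma erase_head (k : String) (v : Int) (rest : List (String × Int))
    (h : k ∉ rest.map Prod.fst) :
    (PySem.Dict.erase (PySem.Dict.mk ((k, v) :: rest)) k).items = rest := by
  simp only [PySem.Dict.erase, List.filter_cons, beq_self_eq_true, Bool.not_true,
    if_neg (Bool.false_ne_true)]
  refine List.filter_eq_self.mpr (fun p hp => ?_)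
  have hne : p.1 ≠ k := fun hk => h (hk ▸ List.mem_map_of_mem hp)
  simp [hne]

lemma eq_of_nodup (diccionario : List (String × Int))
    (h : (diccionario.map Prod.fst).Nodup) :
    cuenta_palabras diccionario = cuenta_palabras_alt diccionario := by
  induction diccionario with
  | nil => rw [cuenta_palabras.eq_1]; rfl
  | cons p rest ih =>
      obtain ⟨k, v⟩ := p
      simp only [List.map_cons, List.nodup_cons] at h
      rw [cuenta_palabras.eq_2, erase_head k v rest h.1, alt_cons, ih h.2]

-- ===== VERDICT (by name: the statement is the Claim_ definition above) =====
theorem cuenta_palabras_spec : Claim_equal_cuenta_palabras := by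
  intro d _ hpre
  exact eq_of_nodup d hpre
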